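-- pv_equiv track=rewrite | github.com/lxcx/rhyming-dictionary | api/index.py | get_rhyme_part
-- ===== SOURCE A (Python) =====
-- def get_rhyme_part(phones):
--     """Extract the rhyming part (last stressed vowel to end)."""
--     phone_list = phones.split()
--
--     # Find last stressed vowel (marked with 1 or 2)
--     last_stressed = -1
--     for i, phone in enumerate(phone_list):
--         if any(c.isdigit() and c in '12' for c in phone):
--             last_stressed = i
--
--     if last_stressed == -1:
--         # No stressed vowel, use last vowel
--         for i, phone in enumerate(phone_list):
--             if any(c.isdigit() for c in phone):
--                 last_stressed = i
--
--     if last_stressed == -1: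
--         return None
--
--     # Return phones from stressed vowel to end
--     return ' '.join(phone_list[last_stressed:])
-- ===== SOURCE B (Python) =====
-- def get_rhyme_part(phones):
--     """Extract the rhyming part (last stressed vowel to end) in one pass."""
--     words = phones.split()
--     last_stressed = -1
--     last_vowel = -1
--     for i, w in enumerate(words):
--         if any(c in '12' for c in w):
--             last_stressed = i
--         if any(c.isdigit() for c in w):
--             last_vowel = i
--     idx = last_stressed if last_stressed != -1 else last_vowel
--     if idx == -1:
--         return None
--     return ' '.join(words[idx:])
-- ===== Notes on version B (the rewrite author's own statement) =====
-- stated objective: alternative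
-- what changed: Single pass over enumerate(words) maintaining two indices (last stressed phone, last any-digit phone) and choosing between them afterwards, instead of A's two sequential scans where the second runs only when the first found nothing; the redundant isdigit() test inside the stress check is dropped.
import Mathlib
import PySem

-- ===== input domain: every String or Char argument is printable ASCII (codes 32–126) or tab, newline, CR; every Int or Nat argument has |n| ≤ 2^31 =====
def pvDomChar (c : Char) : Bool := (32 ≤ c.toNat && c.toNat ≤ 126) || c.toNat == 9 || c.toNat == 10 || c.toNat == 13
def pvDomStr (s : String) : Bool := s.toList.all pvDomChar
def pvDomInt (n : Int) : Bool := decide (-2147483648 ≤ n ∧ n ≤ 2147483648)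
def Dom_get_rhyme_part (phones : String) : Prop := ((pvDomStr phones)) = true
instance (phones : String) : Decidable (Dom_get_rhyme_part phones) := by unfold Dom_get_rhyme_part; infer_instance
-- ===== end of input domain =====

-- B is an alternative single-pass decomposition of the same O(n) task; no speed claim.

-- ===== PORT A =====
def get_rhyme_part (phones : String) : Option String :=
  let phone_list := PySem.Str.split₀ phones
  -- first loop: last phone containing a digit that is in '12'
  let last_stressed : Int :=
    (PySem.List.enumerate phone_list).foldl
      (fun acc ip =>
        if ip.2.toList.any (fun c => PySem.Chars.isdigit c && PySem.Chars.isIn [c] ['1', '2'])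
        then ip.1 else acc) (-1)
  -- second loop, run only when the first found nothing: last phone containing any digit
  let last_stressed : Int :=
    if last_stressed = -1 then
      (PySem.List.enumerate phone_list).foldl
        (fun acc ip => if ip.2.toList.any PySem.Chars.isdigit then ip.1 else acc) last_stressed
    else last_stressed
  if last_stressed = -1 then none
  else some (PySem.Str.join " " (PySem.List.slice phone_list (some last_stressed) none))

-- ===== PORT B =====
def get_rhyme_part_alt (phones : String) : Option String :=
  let words := PySem.Str.split₀ phones
  -- one pass keeping both indices
  let p : Int × Int :=
    (PySem.List.enumerate words).foldl
      (fun acc ip =>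
        ((if ip.2.toList.any (fun c => PySem.Chars.isIn [c] ['1', '2']) then ip.1 else acc.1),
         (if ip.2.toList.any PySem.Chars.isdigit then ip.1 else acc.2)))
      (-1, -1)
  let idx : Int := if p.1 ≠ -1 then p.1 else p.2
  if idx = -1 then none
  else some (PySem.Str.join " " (PySem.List.slice words (some idx) none))

-- ===== PRECONDITION & SPEC =====
def Spec_get_rhyme_part (phones : String) (out : Option String) : Prop := out = get_rhyme_part_alt phones
instance (phones : String) (out : Option String) : Decidable (Spec_get_rhyme_part phones out) := by unfold Spec_get_rhyme_part; infer_instance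

-- ===== CLAIM (what is proved, stated in full; the proofs are below) =====
def Claim_equal_get_rhyme_part : Prop := ∀ (phones : String), Dom_get_rhyme_part phones → Spec_get_rhyme_part phones (get_rhyme_part phones)

-- ===== LEMMAS AND PROOFS =====

-- A's stress test carries a redundant isdigit conjunct: membership in ['1','2'] implies digit.
theorem pv_stress_pred_eq (c : Char) :
    (PySem.Chars.isdigit c && PySem.Chars.isIn [c] ['1', '2'])
      = PySem.Chars.isIn [c] ['1', '2'] := by
  by_cases h : PySem.Chars.isIn [c] ['1', '2'] = true
  · have hm : c ∈ ['1', '2'] := by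
      have := (PySem.Chars.isIn_iff_infix (sub := [c]) (s := ['1', '2'])).mp h
      exact this.sublist.subset (List.mem_singleton.mpr rfl)
    have hd : PySem.Chars.isdigit c = true := by
      simp only [List.mem_cons, List.not_mem_nil, or_false] at hm
      rcases hm with rfl | rfl <;> decide
    simp [h, hd]
  · rw [Bool.eq_false_iff.mpr h, Bool.and_false]

-- choosing between the two accumulated indices afterwards equals A's conditional second scan
theorem pv_choose (F : Int) (G : Int → Int) (j : Int → Option String) :
    (if (if F = -1 then G F else F) = -1 then none
     else j (if F = -1 then G F else F)) =
    (if (if F ≠ -1 then F else G (-1)) = -1 then none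
     else j (if F ≠ -1 then F else G (-1))) := by
  by_cases h : F = -1 <;> simp [h]

-- ===== VERDICT (by name: the statement is the Claim_ definition above) =====
theorem get_rhyme_part_spec : Claim_equal_get_rhyme_part := by
  intro phones _
  unfold Spec_get_rhyme_part get_rhyme_part get_rhyme_part_alt
  simp only [pv_stress_pred_eq]
  rw [PySem.List.foldl_prod_mk
      (f := fun acc (ip : Int × String) =>
        if ip.2.toList.any (fun c => PySem.Chars.isIn [c] ['1', '2']) then ip.1 else acc)
      (g := fun acc (ip : Int × String) =>
        if ip.2.toList.any PySem.Chars.isdigit then ip.1 else acc)]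
  exact pv_choose
    ((PySem.List.enumerate (PySem.Str.split₀ phones)).foldl
      (fun acc ip =>
        if ip.2.toList.any (fun c => PySem.Chars.isIn [c] ['1', '2']) then ip.1 else acc) (-1))
    (fun init => (PySem.List.enumerate (PySem.Str.split₀ phones)).foldl
      (fun acc ip => if ip.2.toList.any PySem.Chars.isdigit then ip.1 else acc) init)
    (fun i => some (PySem.Str.join " " (PySem.List.slice (PySem.Str.split₀ phones) (some i) none)))
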